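-- pv_equiv track=rewrite | github.com/elastic/enterprise-search-sharepoint-server-connector | ees_sharepoint/utils.py | partition_equal_share
-- ===== SOURCE A (Python) =====
-- def partition_equal_share(object_list, total_groups):
--     """ Divides the list in groups of approximately equal sizes
--         :param object_list: list to be partitioned
--         :param total_groups: number of groups to be formed
--     """
--     if object_list:
--         groups = min(total_groups, len(object_list))
--         group_list = []
--         for i in range(groups):
--             group_list.append(object_list[i::groups])
--         return group_list
--     else:
--         return []
-- ===== SOURCE B (Python) =====
-- def partition_equal_share(object_list, total_groups):
--     """Divides the list into groups of approximately equal sizes by a single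
--     round-robin distribution pass (element idx goes to group idx % groups)."""
--     groups = min(total_groups, len(object_list))
--     if groups <= 0:
--         return []
--     group_list = [[] for _ in range(groups)]
--     for idx, item in enumerate(object_list):
--         group_list[idx % groups].append(item)
--     return group_list
-- ===== Notes on version B (the rewrite author's own statement) =====
-- stated objective: alternative
-- what changed: Replaces the per-group strided-slice loop (one slice pass per group) with a single round-robin distribution pass that appends each element to bucket idx % groups.
import Mathlib
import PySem

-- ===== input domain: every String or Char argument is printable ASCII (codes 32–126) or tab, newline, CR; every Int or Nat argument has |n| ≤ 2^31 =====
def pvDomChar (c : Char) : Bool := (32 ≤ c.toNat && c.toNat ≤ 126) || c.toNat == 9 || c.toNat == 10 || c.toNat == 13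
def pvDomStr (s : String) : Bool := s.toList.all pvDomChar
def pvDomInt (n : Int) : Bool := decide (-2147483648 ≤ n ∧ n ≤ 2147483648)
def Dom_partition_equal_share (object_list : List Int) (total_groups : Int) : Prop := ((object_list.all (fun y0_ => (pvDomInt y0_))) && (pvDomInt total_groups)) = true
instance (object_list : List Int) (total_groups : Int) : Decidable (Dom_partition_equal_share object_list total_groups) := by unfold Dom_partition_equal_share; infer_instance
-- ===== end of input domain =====

-- ===== PORT A =====
-- B replaces A's per-group strided-slice loop by a single round-robin distribution pass.
def partition_equal_share (object_list : List Int) (total_groups : Int) : List (List Int) :=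
  if object_list.isEmpty then []
  else
    let groups : Int := min total_groups (object_list.length : Int)
    -- for i in range(groups): group_list.append(object_list[i::groups])
    -- (slice? is none only for step 0; the loop body runs only when groups ≥ 1, so getD [] is unreachable)
    (PySem.List.pyRange 0 groups 1).foldl
      (fun group_list i =>
        group_list ++ [(PySem.List.slice? object_list (some i) none groups).getD []]) []

-- ===== PORT B =====
def partition_equal_share_alt (object_list : List Int) (total_groups : Int) : List (List Int) :=
  let groups : Int := min total_groups (object_list.length : Int)
  if groups ≤ 0 then []
  else
    -- group_list = [[] for _ in range(groups)]
    let init : List (List Int) := (List.range groups.toNat).map (fun _ => ([] : List Int))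
    -- for idx, item in enumerate(object_list): group_list[idx % groups].append(item)
    (PySem.List.enumerate object_list).foldl
      (fun group_list p =>
        group_list.modify (PySem.Int.mod p.1 groups).toNat (fun l => l ++ [p.2])) init

-- ===== PRECONDITION & SPEC =====
def Spec_partition_equal_share (object_list : List Int) (total_groups : Int) (out : List (List Int)) : Prop := out = partition_equal_share_alt object_list total_groups
instance (object_list : List Int) (total_groups : Int) (out : List (List Int)) : Decidable (Spec_partition_equal_share object_list total_groups out) := by unfold Spec_partition_equal_share; infer_instance

-- ===== CLAIM (what is proved, stated in full; the proofs are below) =====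
def Claim_equal_partition_equal_share : Prop := ∀ (object_list : List Int) (total_groups : Int), Dom_partition_equal_share object_list total_groups → Spec_partition_equal_share object_list total_groups (partition_equal_share object_list total_groups)

-- ===== LEMMAS AND PROOFS =====

-- pickFrom g i s xs: the elements of xs whose running index j (starting at s) has j % g = i —
-- the common round-robin bucket both ports compute.
def pickFrom (g i : Nat) : Nat → List Int → List Int
  | _, [] => []
  | s, x :: xs => (if s % g = i then [x] else []) ++ pickFrom g i (s+1) xs

theorem pickFrom_eq_filterMap (g i : Nat) (xs : List Int) : ∀ s : Nat,
    pickFrom g i s xs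
      = List.filterMap (fun j => if (s + j) % g = i then xs[j]? else none) (List.range xs.length) := by
  induction xs with
  | nil => intro s; simp [pickFrom]
  | cons x xs ih =>
    intro s
    rw [List.length_cons, List.range_succ_eq_map]
    simp only [List.filterMap_cons, List.filterMap_map, pickFrom]
    rw [ih (s+1)]
    have hrest :
        (List.filterMap ((fun j => if (s + j) % g = i then (x :: xs)[j]? else none) ∘ Nat.succ)
          (List.range xs.length))
        = List.filterMap (fun j => if (s + 1 + j) % g = i then xs[j]? else none)
            (List.range xs.length) := by
      apply List.filterMap_congr
      intro j _
      simp only [Function.comp_apply, List.getElem?_cons_succ]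
      rw [show s + Nat.succ j = s + 1 + j by omega]
    rw [hrest]
    by_cases h : s % g = i <;> simp [h]

theorem range_filter_mod (g i : Nat) (hg : 0 < g) (hi : i < g) : ∀ n : Nat,
    (List.range n).filter (fun j => j % g = i)
      = (List.range ((n - i + g - 1) / g)).map (fun k => i + g * k) := by
  intro n
  induction n with
  | zero =>
    have h0 : (0 - i + g - 1) / g = 0 := Nat.div_eq_of_lt (by omega)
    simp
    omega
  | succ n ih =>
    rw [List.range_succ, List.filter_append, ih]
    by_cases h : n % g = i
    · have hni : i ≤ n := by
        rcases Nat.lt_or_ge n i with hlt | hle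
        · rw [Nat.mod_eq_of_lt (by omega)] at h; omega
        · exact hle
      have hdvd : g ∣ n - i := by
        have hd := Nat.div_add_mod n g
        exact ⟨n / g, by omega⟩
      obtain ⟨k0, hk0⟩ := hdvd
      have hn : n = i + g * k0 := by omega
      have hc1 : (n - i + g - 1) / g = k0 := by
        rw [show n - i + g - 1 = g * k0 + (g - 1) by omega, Nat.mul_add_div hg,
          Nat.div_eq_of_lt (by omega)]
        omega
      have hc2 : (n + 1 - i + g - 1) / g = k0 + 1 := by
        have hgk : g * (k0 + 1) = g * k0 + g := by ring
        rw [show n + 1 - i + g - 1 = g * (k0 + 1) + 0 by omega, Nat.mul_add_div hg]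
        simp
      rw [hc1, hc2, List.range_succ, List.map_append]
      simp [hn, Nat.mod_eq_of_lt hi]
    · have hc : (n + 1 - i + g - 1) / g = (n - i + g - 1) / g := by
        rcases Nat.lt_or_ge n i with hlt | hle
        · rw [show n + 1 - i + g - 1 = n - i + g - 1 by omega]
        · rw [show n + 1 - i + g - 1 = (n - i + g - 1) + 1 by omega, Nat.succ_div,
            if_neg]
          · omega
          · intro hdvd
            rcases hdvd with ⟨k0, hk0⟩
            rcases k0 with _ | k0
            · omega
            · have hgk : g * (k0 + 1) = g * k0 + g := by ring
              apply h
              rw [show n = i + g * k0 by omega, Nat.add_mul_mod_self_left,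
                Nat.mod_eq_of_lt hi]
      rw [hc]
      simp [h]

theorem sliceA (g i : Nat) (hg : 0 < g) (hig : i < g) (xs : List Int) (hi : i < xs.length) :
    PySem.List.slice? xs (some (i : Int)) none (g : Int) = some (pickFrom g i 0 xs) := by
  have hgz : (g : Int) ≠ 0 := by omega
  have hglt : ¬ ((g : Int) < 0) := by omega
  have hile : ¬ ((i : Int) < 0) := by omega
  simp only [PySem.List.slice?, PySem.List.sliceIndices, if_neg hgz, if_neg hglt, if_neg hile]
  rw [show min (i : Int) (xs.length : Int) = (i : Int) by omega]
  rw [if_pos (show (0 : Int) < (g : Int) by omega),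
    if_pos (show (i : Int) < (xs.length : Int) by omega)]
  congr 1
  have hcnt : (((xs.length : Int) - i + g - 1) / g).toNat = (xs.length - i + g - 1) / g := by
    rw [show ((xs.length : Int) - i + g - 1) = ((xs.length - i + g - 1 : Nat) : Int) by omega,
      ← Int.natCast_div]
    exact Int.toNat_natCast _
  rw [hcnt]
  have harith : List.filterMap (fun k : Nat => xs[((i : Int) + (g : Int) * (k : Int)).toNat]?)
      (List.range ((xs.length - i + g - 1) / g))
      = List.filterMap (fun k => xs[i + g * k]?) (List.range ((xs.length - i + g - 1) / g)) := by
    apply List.filterMap_congr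
    intro k _
    rw [show ((i : Int) + (g : Int) * (k : Int)).toNat = i + g * k by
      rw [show ((i : Int) + (g : Int) * (k : Int)) = ((i + g * k : Nat) : Int) by push_cast; ring]
      exact Int.toNat_natCast _]
  rw [harith, pickFrom_eq_filterMap g i xs 0]
  simp only [Nat.zero_add]
  have hguard : List.filterMap (fun j => if j % g = i then xs[j]? else none)
      (List.range xs.length)
      = List.filterMap (fun j => xs[j]?) ((List.range xs.length).filter (fun j => j % g = i)) := by
    rw [List.filterMap_filter]
    simp
  rw [hguard, range_filter_mod g i hg hig xs.length, List.filterMap_map]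
  simp


theorem modify_map_range (g j : Nat) (f : Nat → List Int) (h : List Int → List Int) :
    ((List.range g).map f).modify j h
      = (List.range g).map (fun i => if i = j then h (f i) else f i) := by
  apply List.ext_getElem
  · simp
  · intro n h1 h2
    simp only [List.length_modify, List.length_map, List.length_range] at h1
    rw [List.getElem_modify]
    simp only [List.getElem_map, List.getElem_range]
    by_cases hn : n = j <;> simp [hn, Ne.symm]

theorem foldB (g : Nat) (hg : 0 < g) (xs : List Int) : ∀ (s : Nat) (f : Nat → List Int),
    (PySem.List.enumerate xs (s : Int)).foldl
        (fun gl p => gl.modify (PySem.Int.mod p.1 (g : Int)).toNat (fun l => l ++ [p.2]))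
        ((List.range g).map f)
      = (List.range g).map (fun i => f i ++ pickFrom g i s xs) := by
  induction xs with
  | nil => intro s f; simp [PySem.List.enumerate_nil, pickFrom]
  | cons x xs ih =>
    intro s f
    rw [PySem.List.enumerate_cons, List.foldl_cons]
    have hmod : (PySem.Int.mod ((s : Int)) (g : Int)).toNat = s % g := by
      rw [PySem.Int.mod_natCast]; exact Int.toNat_natCast _
    rw [hmod, modify_map_range g (s % g) f _,
      show ((s : Int) + 1) = ((s + 1 : Nat) : Int) by push_cast; ring, ih (s+1)]
    apply List.map_congr_left
    intro j _
    simp only [pickFrom]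
    by_cases h : s % g = j
    · rw [if_pos h.symm, if_pos h]
      simp
    · rw [if_neg (fun hh => h hh.symm), if_neg h]
      simp

-- ===== VERDICT (by name: the statement is the Claim_ definition above) =====
theorem partition_equal_share_spec : Claim_equal_partition_equal_share := by
  unfold Claim_equal_partition_equal_share
  intro xs tg _
  unfold Spec_partition_equal_share partition_equal_share partition_equal_share_alt
  dsimp only
  by_cases hemp : xs.isEmpty
  · have hx : xs = [] := List.isEmpty_iff.mp hemp
    subst hx
    simp
  · have hx : xs ≠ [] := fun h => hemp (by simp [h])
    have hlen : 0 < xs.length := List.length_pos_iff.mpr hx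
    rw [if_neg hemp]
    by_cases hle : min tg (xs.length : Int) ≤ 0
    · rw [if_pos hle]
      have hr : PySem.List.pyRange 0 (min tg (xs.length : Int)) 1 = [] := by
        simp [PySem.List.pyRange]
        omega
      rw [hr]
      rfl
    · rw [if_neg hle]
      set G : Int := min tg (xs.length : Int) with hG
      have hGpos : 0 < G := by omega
      have hGlen : G ≤ (xs.length : Int) := by simp [hG]
      set g : Nat := G.toNat with hg
      have hcast : (g : Int) = G := Int.toNat_of_nonneg (by omega)
      have hgpos : 0 < g := by omega
      have hglen : g ≤ xs.length := by omega
      -- A side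
      rw [← hcast, PySem.List.pyRange_zero_natCast g, List.foldl_map,
        PySem.List.foldl_append_singleton_eq_map]
      -- B side
      rw [show (0 : Int) = ((0 : Nat) : Int) by simp,
        foldB g hgpos xs 0 (fun _ => ([] : List Int))]
      apply List.map_congr_left
      intro i hi
      rw [List.mem_range] at hi
      rw [sliceA g i hgpos hi xs (by omega)]
      simp
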